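-- pv_equiv track=rewrite | github.com/awesomepgm/Valkon | api.py | getDamage
-- ===== SOURCE A (Python) =====
-- from itertools import chain
-- from operator import add
--
-- def getDamage(playerRoundStats):
--     damage = lambda x: x["damage"]
--
--     statList = chain.from_iterable(map(damage, playerRoundStats))
--     stats = [0,]*4 #in format [damage, legshot, bodyshot, headshot]
--
--     for stat in statList:
--         stat.pop("reciever")
--         stats = list(map(add, stats,stat.values())) #total the stats
--
--     return stats
-- ===== SOURCE B (Python) =====
-- def getDamage(playerRoundStats):
--     # Phase 1: collect each stat dict's remaining values (popping "reciever",
--     # same mutation and KeyError behaviour as the original).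
--     rows = []
--     for roundStat in playerRoundStats:
--         for stat in roundStat["damage"]:
--             stat.pop("reciever")
--             rows.append(list(stat.values()))
--     # Phase 2: column-wise totals; the [0]*4 guide caps the width at 4 and
--     # handles the no-stats case.
--     return list(map(sum, zip([0] * 4, *rows)))
-- ===== Notes on version B (the rewrite author's own statement) =====
-- stated objective: alternative
-- what changed: B first collects every stat dict's post-pop value row in one pass, then reduces column-wise via zip([0]*4, *rows) with map(sum, ...), replacing A's interleaved per-stat vector additions with a build-then-transpose-and-sum decomposition.
import Mathlib
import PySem

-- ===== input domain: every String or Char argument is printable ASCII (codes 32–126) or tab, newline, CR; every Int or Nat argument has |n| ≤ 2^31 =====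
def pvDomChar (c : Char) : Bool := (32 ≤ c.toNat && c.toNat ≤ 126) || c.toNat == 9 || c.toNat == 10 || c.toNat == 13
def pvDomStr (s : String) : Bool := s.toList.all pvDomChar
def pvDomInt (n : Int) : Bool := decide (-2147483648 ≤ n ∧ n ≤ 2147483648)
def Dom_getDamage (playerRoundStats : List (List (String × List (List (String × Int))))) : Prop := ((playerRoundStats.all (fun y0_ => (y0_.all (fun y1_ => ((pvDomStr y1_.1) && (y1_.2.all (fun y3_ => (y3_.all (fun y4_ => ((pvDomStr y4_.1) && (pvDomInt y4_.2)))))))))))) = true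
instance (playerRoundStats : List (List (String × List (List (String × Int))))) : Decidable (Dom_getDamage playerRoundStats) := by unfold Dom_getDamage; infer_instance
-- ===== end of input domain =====

-- B collects all post-pop value rows first, then totals them column-wise via zip([0]*4, *rows);
-- return-value equivalence only is proved (both Pythons pop "reciever" from every stat dict in place, identically).


-- ===== PORT A =====
-- x["damage"] / stat.pop("reciever") raise KeyError when the key is missing; Pre_getDamage
-- excludes exactly those inputs, so the total forms getD/erase are used here.
def getDamage (playerRoundStats : List (List (String × List (List (String × Int))))) : List Int :=
  let statList := (playerRoundStats.map (fun x => (PySem.Dict.ofList x).getD "damage" [])).flatten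
  statList.foldl
    (fun stats stat =>
      -- map(add, stats, stat.values()) truncates to the shorter list = zipWith
      List.zipWith (· + ·) stats ((PySem.Dict.ofList stat).erase "reciever").values)
    [0, 0, 0, 0]

-- ===== PORT B =====
-- hand port of list(map(sum, zip(guide, *rows))): exact — zip stops at the shortest of
-- guide and the rows, and each output entry is the sum of that column.
def zipSum (guide : List Int) (rows : List (List Int)) : List Int :=
  match guide with
  | [] => []
  | g :: gt =>
    if rows.all (fun r => !r.isEmpty) then
      (g + (rows.map (fun r => r.headD 0)).sum) :: zipSum gt (rows.map List.tail)
    else []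

def getDamage_alt (playerRoundStats : List (List (String × List (List (String × Int))))) : List Int :=
  let rows := playerRoundStats.foldl
    (fun acc roundStat =>
      ((PySem.Dict.ofList roundStat).getD "damage" []).foldl
        (fun acc2 stat => acc2 ++ [((PySem.Dict.ofList stat).erase "reciever").values]) acc)
    []
  zipSum [0, 0, 0, 0] rows

-- ===== PRECONDITION & SPEC =====
-- Pre_ excludes exactly the inputs where the Python raises KeyError: a round dict without a
-- "damage" key, or a stat dict without a "reciever" key (B raises the same KeyError there).
def Pre_getDamage (playerRoundStats : List (List (String × List (List (String × Int))))) : Prop :=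
  ∀ x ∈ playerRoundStats, (PySem.Dict.ofList x).contains "damage" = true ∧
    ∀ s ∈ (PySem.Dict.ofList x).getD "damage" [],
      (PySem.Dict.ofList s).contains "reciever" = true
instance (playerRoundStats : List (List (String × List (List (String × Int))))) : Decidable (Pre_getDamage playerRoundStats) := by unfold Pre_getDamage; infer_instance

def pvWitness_getDamage : (List (List (String × List (List (String × Int))))) :=
  [[("damage", [[("reciever", 1), ("damage", 20), ("legshot", 0), ("bodyshot", 1), ("headshot", 2)]])]]

def Spec_getDamage (playerRoundStats : List (List (String × List (List (String × Int))))) (out : List Int) : Prop := out = getDamage_alt playerRoundStats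
instance (playerRoundStats : List (List (String × List (List (String × Int))))) (out : List Int) : Decidable (Spec_getDamage playerRoundStats out) := by unfold Spec_getDamage; infer_instance

-- ===== CLAIM (what is proved, stated in full; the proofs are below) =====
def Claim_equal_getDamage : Prop := ∀ (playerRoundStats : List (List (String × List (List (String × Int))))), Dom_getDamage playerRoundStats → Pre_getDamage playerRoundStats → Spec_getDamage playerRoundStats (getDamage playerRoundStats)

-- ===== LEMMAS AND PROOFS =====

-- zip-truncation shift: consuming one row on the left equals folding it into the guide.
theorem zipSum_cons (guide r : List Int) (rest : List (List Int)) :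
    zipSum guide (r :: rest) = zipSum (List.zipWith (· + ·) guide r) rest := by
  induction guide generalizing r rest with
  | nil => simp [zipSum]
  | cons g gt ih =>
    cases r with
    | nil => simp [zipSum]
    | cons h t =>
      simp only [zipSum, List.all_cons, List.map_cons, List.sum_cons, List.zipWith_cons_cons,
        List.isEmpty_cons, Bool.not_false, Bool.true_and, List.headD_cons, List.tail_cons]
      rw [ih]
      split
      · rw [← add_assoc]
      · rfl

-- A's interleaved vector-add fold equals B's column-wise zipSum.
theorem zipSum_nil (s : List Int) : zipSum s [] = s := by
  induction s with
  | nil => rfl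
  | cons g gt ih => simp [zipSum, ih]

theorem foldl_zipWith_eq_zipSum (rows : List (List Int)) (s : List Int) :
    rows.foldl (fun stats r => List.zipWith (· + ·) stats r) s = zipSum s rows := by
  induction rows generalizing s with
  | nil => simp [zipSum_nil]
  | cons r rest ih => rw [List.foldl_cons, ih, zipSum_cons]

-- the inner append loop of B's phase 1 is a map.
theorem foldl_append_singleton {α β : Type} (f : α → β) (l : List α) (acc : List β) :
    l.foldl (fun a s => a ++ [f s]) acc = acc ++ l.map f := by
  induction l generalizing acc with
  | nil => simp
  | cons x xs ih => simp [ih]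

-- B's phase-1 double loop builds the mapped flatten of the "damage" lists.
theorem rows_eq (prs : List (List (String × List (List (String × Int)))))
    (acc : List (List Int)) :
    prs.foldl
      (fun acc roundStat =>
        ((PySem.Dict.ofList roundStat).getD "damage" []).foldl
          (fun acc2 stat => acc2 ++ [((PySem.Dict.ofList stat).erase "reciever").values]) acc)
      acc
    = acc ++ ((prs.map (fun x => (PySem.Dict.ofList x).getD "damage" [])).flatten).map
        (fun stat => ((PySem.Dict.ofList stat).erase "reciever").values) := by
  induction prs generalizing acc with
  | nil => simp
  | cons x xs ih => rw [List.foldl_cons, ih, foldl_append_singleton]; simp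

-- ===== VERDICT (by name: the statement is the Claim_ definition above) =====
theorem getDamage_spec : Claim_equal_getDamage := by
  intro prs _ _
  unfold Spec_getDamage getDamage getDamage_alt
  rw [rows_eq prs [], List.nil_append, ← foldl_zipWith_eq_zipSum, List.foldl_map]
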